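-- pv_equiv track=rewrite | github.com/julio-navarro-lara/thesis_scripts | simsc_darpa2000/utils/previous_stats.py | split_by_ip_addresses
-- ===== SOURCE A (Python) =====
-- def split_by_ip_addresses(list_log_dict,n_commonip):
--
--     result = {}
--
--     for element in list_log_dict:
--
--         if "ip_addresses" in element:
--             list_ip_addresses = element["ip_addresses"]
--
--             joined_ip_addr = ",".join(list_ip_addresses)
--             if joined_ip_addr in result:
--                 result[joined_ip_addr].append(element)
--             else:
--                 result[joined_ip_addr] = [element]
--         else:
--             if "NONE" in result:
--                 result["NONE"].append(element)
--             else: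
--                 result["NONE"] = [element]
--
--     return result
-- ===== SOURCE B (Python) =====
-- def split_by_ip_addresses(list_log_dict, n_commonip):
--     def key(element):
--         if "ip_addresses" in element:
--             return ",".join(element["ip_addresses"])
--         return "NONE"
--     keys = [key(e) for e in list_log_dict]
--     return {k: [e for e, ek in zip(list_log_dict, keys) if ek == k]
--             for k in dict.fromkeys(keys)}
-- ===== Notes on version B (the rewrite author's own statement) =====
-- stated objective: alternative
-- what changed: Replaces A's single-pass dict of growing lists (check-membership, append-or-create per element) with a two-phase scheme: compute all keys once, dedup them in first-occurrence order, then build each group by one comprehension over the zipped list.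
import Mathlib
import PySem

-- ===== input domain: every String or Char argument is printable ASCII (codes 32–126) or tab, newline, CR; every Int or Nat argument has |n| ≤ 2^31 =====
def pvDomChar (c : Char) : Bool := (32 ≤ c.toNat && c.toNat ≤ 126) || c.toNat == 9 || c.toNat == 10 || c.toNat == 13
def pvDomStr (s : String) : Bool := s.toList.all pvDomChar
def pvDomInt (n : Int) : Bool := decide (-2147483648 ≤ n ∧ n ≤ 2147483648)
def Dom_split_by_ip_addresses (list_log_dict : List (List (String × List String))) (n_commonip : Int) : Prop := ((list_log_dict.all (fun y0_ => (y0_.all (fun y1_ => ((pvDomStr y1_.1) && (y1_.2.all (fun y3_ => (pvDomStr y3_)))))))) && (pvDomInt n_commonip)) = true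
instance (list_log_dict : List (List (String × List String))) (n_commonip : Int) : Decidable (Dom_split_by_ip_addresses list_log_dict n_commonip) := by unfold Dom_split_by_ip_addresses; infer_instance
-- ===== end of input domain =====

-- B replaces A's single-pass "append or create" dict loop by: compute all keys once,
-- dedup them in first-occurrence order, then build each group by one filter pass (alternative decomposition, not faster).
-- The unused parameter n_commonip is kept as in A.

-- ===== PORT A =====
def split_by_ip_addresses (list_log_dict : List (List (String × List String))) (n_commonip : Int) : List (String × List (List (String × List String))) :=
  (list_log_dict.foldl (fun result element =>
      match (PySem.Dict.mk element).get? "ip_addresses" with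
      | some list_ip_addresses =>
          let joined_ip_addr := PySem.Str.join "," list_ip_addresses
          if result.contains joined_ip_addr then
            result.modify joined_ip_addr [] (· ++ [element])   -- result[j].append(element)
          else
            result.insert joined_ip_addr [element]
      | none =>
          if result.contains "NONE" then
            result.modify "NONE" [] (· ++ [element])           -- result["NONE"].append(element)
          else
            result.insert "NONE" [element])
    PySem.Dict.empty).items

-- ===== PORT B =====
-- key(element)
def pvKey (element : List (String × List String)) : String :=
  match (PySem.Dict.mk element).get? "ip_addresses" with
  | some ips => PySem.Str.join "," ips
  | none => "NONE"

def split_by_ip_addresses_alt (list_log_dict : List (List (String × List String))) (n_commonip : Int) : List (String × List (List (String × List String))) :=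
  let keys := list_log_dict.map pvKey
  (PySem.List.dedup keys).map (fun k =>
    (k, ((list_log_dict.zip keys).filter (fun p => p.2 == k)).map (·.1)))

-- ===== PRECONDITION & SPEC =====
def Spec_split_by_ip_addresses (list_log_dict : List (List (String × List String))) (n_commonip : Int) (out : List (String × List (List (String × List String)))) : Prop := out = split_by_ip_addresses_alt list_log_dict n_commonip
instance (list_log_dict : List (List (String × List String))) (n_commonip : Int) (out : List (String × List (List (String × List String)))) : Decidable (Spec_split_by_ip_addresses list_log_dict n_commonip out) := by unfold Spec_split_by_ip_addresses; infer_instance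

-- ===== CLAIM (what is proved, stated in full; the proofs are below) =====
def Claim_equal_split_by_ip_addresses : Prop := ∀ (list_log_dict : List (List (String × List String))) (n_commonip : Int), Dom_split_by_ip_addresses list_log_dict n_commonip → Spec_split_by_ip_addresses list_log_dict n_commonip (split_by_ip_addresses list_log_dict n_commonip)

-- ===== LEMMAS AND PROOFS =====

-- A's branch pair is one dict 'modify' at the element's key
lemma stepA_eq_modify (result : PySem.Dict String (List (List (String × List String)))) (element : List (String × List String)) :
    (match (PySem.Dict.mk element).get? "ip_addresses" with
      | some list_ip_addresses =>
          let joined_ip_addr := PySem.Str.join "," list_ip_addresses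
          if result.contains joined_ip_addr then
            result.modify joined_ip_addr [] (· ++ [element])
          else
            result.insert joined_ip_addr [element]
      | none =>
          if result.contains "NONE" then
            result.modify "NONE" [] (· ++ [element])
          else
            result.insert "NONE" [element]) =
    result.modify (pvKey element) [] (· ++ [element]) := by
  unfold pvKey
  cases h : (PySem.Dict.mk element).get? "ip_addresses" <;> simp only []
  · split_ifs with hc
    · rfl
    · simp [PySem.Dict.modify, PySem.Dict.getD_of_not_contains _ _ (by simpa using hc)]
  · split_ifs with hc
    · rfl
    · simp [PySem.Dict.modify, PySem.Dict.getD_of_not_contains _ _ (by simpa using hc)]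

theorem split_by_ip_addresses_spec : Claim_equal_split_by_ip_addresses := by
  intro l n _
  unfold Spec_split_by_ip_addresses split_by_ip_addresses split_by_ip_addresses_alt
  have hfold : (l.foldl (fun result element =>
      match (PySem.Dict.mk element).get? "ip_addresses" with
      | some list_ip_addresses =>
          let joined_ip_addr := PySem.Str.join "," list_ip_addresses
          if result.contains joined_ip_addr then
            result.modify joined_ip_addr [] (· ++ [element])
          else
            result.insert joined_ip_addr [element]
      | none =>
          if result.contains "NONE" then
            result.modify "NONE" [] (· ++ [element])
          else
            result.insert "NONE" [element]) PySem.Dict.empty)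
      = (l.map (fun e => (pvKey e, e))).foldl (fun d p => d.modify p.1 [] (· ++ [p.2])) PySem.Dict.empty := by
    rw [List.foldl_map]
    exact List.foldl_ext _ _ _ (fun d e _ => stepA_eq_modify d e)
  rw [hfold]
  set D := (l.map (fun e => (pvKey e, e))).foldl (fun d p => d.modify p.1 [] (· ++ [p.2])) PySem.Dict.empty with hD
  have hnd : D.keys.Nodup := by
    rw [hD]
    exact PySem.Dict.nodup_keys_foldl_modify_key _ Prod.fst _ _ _ (by simp)
  have hkeys : D.keys = PySem.List.dedup (l.map pvKey) := by
    rw [hD, PySem.Dict.keys_foldl_modify_key]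
    simp [PySem.Set.update, PySem.Set.ofList, List.map_map, Function.comp_def]
  have hget : ∀ k, D.getD k [] = ((l.zip (l.map pvKey)).filter (fun p => p.2 == k)).map (·.1) := by
    intro k
    rw [hD, PySem.Dict.getD_foldl_modify_append]
    rw [← List.map_prod_left_eq_zip]
    simp [List.filter_map, Function.comp_def]
  rw [PySem.Dict.items_eq_map_keys D hnd [], hkeys]
  exact List.map_congr_left (fun k _ => by rw [hget k])
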